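-- pv_equiv track=rewrite | github.com/Coidemo/TextffCut | use_cases/ai/srt_edit_log.py | _map_edited_to_original_indices
-- ===== SOURCE A (Python) =====
-- def _map_edited_to_original_indices(
--     edited_flat: str,
--     original_flat: str,
-- ) -> list[int] | None:
--     """編集後 flat text の各文字が元 flat text のどの index にあるかを返す.
--
--     ユーザーは文字を削除のみ可能（追加は許可しない）前提。
--     mapping できなければ None.
--     """
--     indices: list[int] = []
--     orig_pos = 0
--     for ch in edited_flat:
--         while orig_pos < len(original_flat) and original_flat[orig_pos] != ch:
--             orig_pos += 1
--         if orig_pos >= len(original_flat):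
--             return None
--         indices.append(orig_pos)
--         orig_pos += 1
--     return indices
-- ===== SOURCE B (Python) =====
-- from bisect import bisect_left
--
--
-- def _map_edited_to_original_indices(
--     edited_flat: str,
--     original_flat: str,
-- ) -> list[int] | None:
--     """Subsequence mapping via a per-character sorted index table + binary search."""
--     occ: dict[str, list[int]] = {}
--     for i, ch in enumerate(original_flat):
--         occ.setdefault(ch, []).append(i)
--     indices: list[int] = []
--     orig_pos = 0
--     for ch in edited_flat:
--         positions = occ.get(ch)
--         if positions is None:
--             return None
--         j = bisect_left(positions, orig_pos)
--         if j == len(positions):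
--             return None
--         p = positions[j]
--         indices.append(p)
--         orig_pos = p + 1
--     return indices
-- ===== Notes on version B (the rewrite author's own statement) =====
-- stated objective: alternative
-- what changed: Replaces A's forward cursor scan over the original string by a precomputed dict mapping each character to its sorted occurrence-index list, queried with bisect_left against the running cursor.
import Mathlib
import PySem

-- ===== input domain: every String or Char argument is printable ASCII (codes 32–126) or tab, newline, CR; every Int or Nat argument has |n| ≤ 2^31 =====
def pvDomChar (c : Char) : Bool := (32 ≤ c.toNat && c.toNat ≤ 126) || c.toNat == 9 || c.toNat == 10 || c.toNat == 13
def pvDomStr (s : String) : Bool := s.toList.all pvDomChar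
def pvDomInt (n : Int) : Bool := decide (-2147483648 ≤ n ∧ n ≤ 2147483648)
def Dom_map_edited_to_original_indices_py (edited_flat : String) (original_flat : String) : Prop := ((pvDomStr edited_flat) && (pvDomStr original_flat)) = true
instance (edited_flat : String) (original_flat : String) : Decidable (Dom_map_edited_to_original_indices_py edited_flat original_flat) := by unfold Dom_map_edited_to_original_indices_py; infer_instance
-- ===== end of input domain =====

-- B replaces A's forward cursor scan by a precomputed per-character sorted index table
-- queried with bisect_left; objective: alternative algorithm (not claimed faster).

-- ===== PORT A =====
-- the inner `while orig_pos < len(original_flat) and original_flat[orig_pos] != ch: orig_pos += 1`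
def scanWhileA (s : List Char) (c : Char) (p : Nat) : Nat :=
  if _h : p < s.length ∧ s[p]? ≠ some c then scanWhileA s c (p + 1) else p
termination_by s.length - p
decreasing_by omega

-- the `for ch in edited_flat` loop, carrying orig_pos and indices
def goA (orig : List Char) : List Char → Nat → List Int → Option (List Int)
  | [], _, indices => some indices
  | ch :: rest, p, indices =>
      let q := scanWhileA orig ch p
      if orig.length ≤ q then none
      else goA orig rest (q + 1) (indices ++ [(q : Int)])

def map_edited_to_original_indices_py (edited_flat : String) (original_flat : String) : Option (List Int) :=
  goA original_flat.toList edited_flat.toList 0 []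

-- ===== PORT B =====
-- occ.setdefault(ch, []).append(i) over enumerate(original_flat)
def buildOccB (s : List Char) : PySem.Dict Char (List Int) :=
  (PySem.List.enumerate s 0).foldl (fun d p => d.modify p.2 [] (· ++ [p.1])) PySem.Dict.empty

-- the `for ch in edited_flat` loop: dict lookup + bisect_left; `ps[j]?` is Python's
-- `if j == len(positions): return None` followed by `positions[j]` (bisect_left ≤ len,
-- so `none` is exactly the j == len case)
def goB (occ : PySem.Dict Char (List Int)) : List Char → Int → List Int → Option (List Int)
  | [], _, indices => some indices
  | ch :: rest, origPos, indices =>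
      match occ.get? ch with
      | none => none
      | some ps =>
          match ps[PySem.List.bisectLeft ps origPos]? with
          | none => none
          | some q => goB occ rest (q + 1) (indices ++ [q])

def map_edited_to_original_indices_py_alt (edited_flat : String) (original_flat : String) : Option (List Int) :=
  goB (buildOccB original_flat.toList) edited_flat.toList 0 []

-- ===== PRECONDITION & SPEC =====
def Spec_map_edited_to_original_indices_py (edited_flat : String) (original_flat : String) (out : Option (List Int)) : Prop := out = map_edited_to_original_indices_py_alt edited_flat original_flat
instance (edited_flat : String) (original_flat : String) (out : Option (List Int)) : Decidable (Spec_map_edited_to_original_indices_py edited_flat original_flat out) := by unfold Spec_map_edited_to_original_indices_py; infer_instance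

-- ===== CLAIM (what is proved, stated in full; the proofs are below) =====
def Claim_equal_map_edited_to_original_indices_py : Prop := ∀ (edited_flat : String) (original_flat : String), Dom_map_edited_to_original_indices_py edited_flat original_flat → Spec_map_edited_to_original_indices_py edited_flat original_flat (map_edited_to_original_indices_py edited_flat original_flat)

-- ===== LEMMAS AND PROOFS =====

-- the list of occurrence indices of c in s, offset by i0 (what buildOccB stores per key)
def posFrom (c : Char) : List Char → Int → List Int
  | [], _ => []
  | x :: xs, i0 => (if x = c then [i0] else []) ++ posFrom c xs (i0 + 1)

theorem mem_posFrom {c : Char} : ∀ (s : List Char) (i0 x : Int),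
    x ∈ posFrom c s i0 ↔ ∃ k : Nat, k < s.length ∧ x = i0 + k ∧ s[k]? = some c := by
  intro s
  induction s with
  | nil => simp [posFrom]
  | cons a t ih =>
      intro i0 x
      simp only [posFrom, List.mem_append]
      constructor
      · rintro (h | h)
        · refine ⟨0, by simp, ?_, ?_⟩ <;> by_cases ha : a = c <;> simp_all
        · obtain ⟨k, hk, hx, hkc⟩ := (ih (i0 + 1) x).1 h
          exact ⟨k + 1, by simpa using hk, by push_cast; omega, by simpa using hkc⟩
      · rintro ⟨k, hk, hx, hkc⟩
        cases k with
        | zero => left; simp at hkc; simp [hkc, hx]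
        | succ k =>
            right
            exact (ih (i0 + 1) x).2 ⟨k, by simpa using hk, by push_cast at hx ⊢; omega,
              by simpa using hkc⟩

theorem posFrom_lb {c : Char} : ∀ (s : List Char) (i0 x : Int), x ∈ posFrom c s i0 → i0 ≤ x := by
  intro s i0 x hx
  obtain ⟨k, _, hx, _⟩ := (mem_posFrom s i0 x).1 hx
  omega

theorem posFrom_pairwise {c : Char} : ∀ (s : List Char) (i0 : Int),
    (posFrom c s i0).Pairwise (· < ·) := by
  intro s
  induction s with
  | nil => simp [posFrom]
  | cons a t ih =>
      intro i0
      by_cases ha : a = c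
      · simp only [posFrom, ha]
        refine List.Pairwise.cons ?_ (ih (i0 + 1))
        intro x hx
        have := posFrom_lb t (i0 + 1) x hx
        omega
      · simpa [posFrom, ha] using ih (i0 + 1)

-- the occurrence table stores exactly posFrom
theorem buildOccB_getD : ∀ (s : List Char) (i0 : Int) (d : PySem.Dict Char (List Int)) (c : Char),
    ((PySem.List.enumerate s i0).foldl (fun d p => d.modify p.2 [] (· ++ [p.1])) d).getD c []
      = d.getD c [] ++ posFrom c s i0 := by
  intro s
  induction s with
  | nil => intro i0 d c; simp [PySem.List.enumerate_nil, posFrom]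
  | cons a t ih =>
      intro i0 d c
      rw [PySem.List.enumerate_cons, List.foldl_cons, ih]
      by_cases hc : c = a
      · subst hc
        rw [PySem.Dict.getD_modify_self]
        simp [posFrom]
      · rw [PySem.Dict.getD_modify_of_ne _ _ _ hc]
        simp [posFrom, (Ne.symm hc : a ≠ c)]

-- dropWhile (< p) facts
theorem dropWhile_lt_nil {l : List Int} {p : Int} (h : ∀ x ∈ l, x < p) :
    l.dropWhile (fun x => decide (x < p)) = [] := by
  rw [List.dropWhile_eq_nil_iff]; intro x hx; simpa using h x hx

theorem dropWhile_lt_succ {l : List Int} {p : Int} (h : p ∉ l) :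
    l.dropWhile (fun x => decide (x < p)) = l.dropWhile (fun x => decide (x < p + 1)) := by
  induction l with
  | nil => rfl
  | cons a t ih =>
      have hap : a ≠ p := fun hh => h (hh ▸ List.mem_cons_self)
      by_cases ha : a < p
      · rw [List.dropWhile_cons_of_pos (by simpa using ha),
          List.dropWhile_cons_of_pos (by simp; omega)]
        exact ih (fun hh => h (List.mem_cons_of_mem _ hh))
      · rw [List.dropWhile_cons_of_neg (by simpa using ha),
          List.dropWhile_cons_of_neg (by simp; omega)]

theorem head?_dropWhile_lt_of_mem {l : List Int} {p : Int}
    (hs : l.Pairwise (· < ·)) (hm : p ∈ l) :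
    (l.dropWhile (fun x => decide (x < p))).head? = some p := by
  induction l with
  | nil => simp at hm
  | cons a t ih =>
      by_cases ha : a < p
      · rw [List.dropWhile_cons_of_pos (by simpa using ha)]
        have hpt : p ∈ t := by
          rcases List.mem_cons.1 hm with h | h
          · omega
          · exact h
        exact ih hs.of_cons hpt
      · rw [List.dropWhile_cons_of_neg (by simpa using ha)]
        have : a = p := by
          rcases List.mem_cons.1 hm with h | h
          · omega
          · have := (List.pairwise_cons.1 hs).1 p h; omega
        simp [this]

theorem drop_eq_dropWhile_lt (x : Int) : ∀ (l : List Int) (j : Nat), j ≤ l.length →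
    (∀ (k : Nat) (hk : k < l.length), k < j → l[k] < x) →
    (∀ (k : Nat) (hk : k < l.length), j ≤ k → x ≤ l[k]) →
    l.drop j = l.dropWhile (fun y => decide (y < x)) := by
  intro l
  induction l with
  | nil => simp
  | cons a t ih =>
      intro j hle hlt hge
      cases j with
      | zero =>
          have h0 : x ≤ a := by simpa using hge 0 (by simp) (by omega)
          rw [List.dropWhile_cons_of_neg (by simp; omega)]
          simp
      | succ j =>
          have ha : a < x := by simpa using hlt 0 (by simp) (by omega)
          rw [List.dropWhile_cons_of_pos (by simpa using ha), List.drop_succ_cons]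
          exact ih j (by simpa using hle)
            (fun k hk hkj => by simpa using hlt (k + 1) (by simpa using hk) (by omega))
            (fun k hk hkj => by simpa using hge (k + 1) (by simpa using hk) (by omega))

-- bisect_left on a sorted list followed by indexing = head of dropWhile (< x)
theorem getElem?_bisectLeft_sorted (l : List Int) (x : Int) (hs : l.Pairwise (· ≤ ·)) :
    l[PySem.List.bisectLeft l x]? = (l.dropWhile (fun y => decide (y < x))).head? := by
  obtain ⟨hle, hlt, hge⟩ := PySem.List.bisectLeft_spec l x hs
  rw [← List.head?_drop]
  congr 1
  exact drop_eq_dropWhile_lt x l _ hle hlt hge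

-- A's while scan, characterised through the occurrence list
theorem scan_vs_pos (s : List Char) (c : Char) : ∀ (p : Nat),
    ((posFrom c s 0).dropWhile (fun y => decide (y < (p : Int)))).head?
      = if scanWhileA s c p < s.length then some ((scanWhileA s c p : Nat) : Int) else none := by
  intro p
  induction hn : s.length - p using Nat.strong_induction_on generalizing p with
  | _ n ih =>
  by_cases hp : p < s.length
  · by_cases hc : s[p]? = some c
    · -- found at p
      rw [scanWhileA, dif_neg (by simp [hc]), if_pos hp]
      exact head?_dropWhile_lt_of_mem (posFrom_pairwise s 0)
        ((mem_posFrom s 0 (p : Int)).2 ⟨p, hp, by simp, hc⟩)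
    · -- advance
      have hstep : scanWhileA s c p = scanWhileA s c (p + 1) := by
        rw [scanWhileA, dif_pos ⟨hp, hc⟩]
      have hnot : ((p : Nat) : Int) ∉ posFrom c s 0 := by
        intro hmem
        obtain ⟨k, hk, hkeq, hkc⟩ := (mem_posFrom s 0 _).1 hmem
        have : k = p := by omega
        exact hc (this ▸ hkc)
      rw [dropWhile_lt_succ hnot, hstep]
      have := ih (s.length - (p + 1)) (by omega) (p + 1) rfl
      simpa [Nat.cast_add] using this
  · -- p beyond the string: loop exits immediately, nothing matches
    have hscan : scanWhileA s c p = p := by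
      rw [scanWhileA, dif_neg (fun h => hp h.1)]
    rw [hscan, if_neg hp, dropWhile_lt_nil]
    · rfl
    · intro x hx
      obtain ⟨k, hk, hkeq, _⟩ := (mem_posFrom s 0 x).1 hx
      omega

theorem goA_eq_goB (orig : List Char) : ∀ (e : List Char) (p : Nat) (acc : List Int),
    goA orig e p acc = goB (buildOccB orig) e ((p : Nat) : Int) acc := by
  intro e
  induction e with
  | nil => intro p acc; rfl
  | cons ch rest ih =>
      intro p acc
      have hgetD : (buildOccB orig).getD ch [] = posFrom ch orig 0 := by
        simpa using buildOccB_getD orig 0 PySem.Dict.empty ch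
      simp only [goA, goB]
      cases hg : (buildOccB orig).get? ch with
      | none =>
          have hpos : posFrom ch orig 0 = [] := by
            rw [← hgetD]; simp [PySem.Dict.getD, hg]
          have hscan := scan_vs_pos orig ch p
          rw [hpos] at hscan
          simp only [List.dropWhile_nil, List.head?_nil] at hscan
          by_cases hfound : scanWhileA orig ch p < orig.length
          · rw [if_pos hfound] at hscan; exact absurd hscan (by simp)
          · rw [if_pos (by omega : orig.length ≤ scanWhileA orig ch p)]
      | some ps =>
          have hps : ps = posFrom ch orig 0 := by
            rw [← hgetD]; simp [PySem.Dict.getD, hg]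
          have hstep : ps[PySem.List.bisectLeft ps ((p : Nat) : Int)]?
              = if scanWhileA orig ch p < orig.length
                then some ((scanWhileA orig ch p : Nat) : Int) else none := by
            rw [hps, getElem?_bisectLeft_sorted _ _
              ((posFrom_pairwise orig 0).imp (fun h => le_of_lt h))]
            exact scan_vs_pos orig ch p
          by_cases hfound : scanWhileA orig ch p < orig.length
          · rw [if_pos hfound] at hstep
            rw [if_neg (by omega : ¬ orig.length ≤ scanWhileA orig ch p)]
            dsimp only
            rw [hstep]
            dsimp only
            rw [ih (scanWhileA orig ch p + 1) (acc ++ [((scanWhileA orig ch p : Nat) : Int)])]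
            norm_num
          · rw [if_neg hfound] at hstep
            rw [if_pos (by omega : orig.length ≤ scanWhileA orig ch p)]
            dsimp only
            rw [hstep]

-- ===== VERDICT (by name: the statement is the Claim_ definition above) =====
theorem map_edited_to_original_indices_py_spec : Claim_equal_map_edited_to_original_indices_py := by
  intro e o _
  show goA o.toList e.toList 0 [] = _
  simpa using goA_eq_goB o.toList e.toList 0 []
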